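-- pv_equiv track=rewrite | github.com/TeamW-P/RNABayesPairing2 | core/src/scanning/src/utils/structure.py | decomposition
-- ===== SOURCE A (Python) =====
-- def bracket_to_index(inst):
--     """
--     For a given bracket-dot presented secondary structure S, the function returns an iterger list L.
--     L[i] = j if i and j are paired in S.
--     """
--     res = [-1]*(len(inst)+2)
--     tmp = []
--     for i,c in enumerate("("+inst+")"):
--         if c == '(':
--             tmp.append(i)
--         elif c == ')':
--             j = tmp.pop()
--             res[i], res[j] = j, i
--     return res
--
-- def decomposition(inst):
--     """
--     Decompose a given bracket-dot presented RNA secondary structure into several basic components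
--     in tree-presentation.
--     A basic component is presented by a list of its paired bases positions
--     """
--     index = bracket_to_index(inst)
--     def aux(ind):
--         """
--         A recursive function decomposing a given RNA secondary structure in index list
--         from a given starting position.
--         """
--         tmp = []
--         res = []
--         k = ind+1
--         while True:
--             if index[k] == -1 :
--                 k += 1
--             elif index[k] > k:
--                 tmp.append((k, index[k]))
--                 res += aux(k)
--                 k = index[k]+1
--             else:
--                 break
--         return [[(ind,index[ind])]+tmp]+res
--
--     res = aux(0)
--     return res
-- ===== SOURCE B (Python) =====
-- def decomposition(inst):
--     """
--     Decompose a bracket-dot RNA secondary structure into its basic components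
--     (tree presentation, preorder), with one left-to-right scan over the padded
--     string and an explicit stack of partially-built components -- no pairing
--     index array and no recursion.
--     """
--     st = []
--     out = None
--     for i, c in enumerate("(" + inst + ")"):
--         if c == '(':
--             st.append((i, [], []))
--         elif c == ')':
--             o, kids, sub = st.pop()
--             out = [[(o, i)] + kids] + sub
--             if st:
--                 po, pkids, psub = st.pop()
--                 st.append((po, pkids + [(o, i)], psub + out))
--     return out
-- ===== Notes on version B (the rewrite author's own statement) =====
-- stated objective: simpler
-- what changed: Replaces A's pairing-index array plus nested recursive traversal (bracket_to_index + aux) with a single left-to-right scan over the padded string that maintains an explicit stack of partially built components; no index array and no recursion.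
-- outside the precondition, e.g. on decomposition(')('): A returns [[(0, 1)]], B returns [[(2, 3)]]; on decomposition(')(('): A returns [[(0, 1)]], B returns [[(3, 4)]]
import Mathlib
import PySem

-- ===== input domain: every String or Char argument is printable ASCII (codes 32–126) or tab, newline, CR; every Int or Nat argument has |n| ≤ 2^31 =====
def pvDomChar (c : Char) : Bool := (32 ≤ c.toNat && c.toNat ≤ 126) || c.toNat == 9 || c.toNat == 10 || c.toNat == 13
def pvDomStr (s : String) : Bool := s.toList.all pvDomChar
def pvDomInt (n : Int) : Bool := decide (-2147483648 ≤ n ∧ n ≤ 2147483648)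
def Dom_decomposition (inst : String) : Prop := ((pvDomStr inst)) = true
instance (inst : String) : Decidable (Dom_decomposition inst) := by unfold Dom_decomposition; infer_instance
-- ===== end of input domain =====

-- B replaces A's pairing-index array plus recursive traversal by a single left-to-right
-- scan with an explicit stack of partially built components (objective: simpler).

-- ===== PORT A =====

-- padded string "(" + inst + ")" as a char list (enumerate in Python iterates its chars)
def pvPadded (inst : String) : List Char := '(' :: inst.toList ++ [')']

-- one step of the fold in bracket_to_index; state = (res, tmp), stack top = list head.
-- On ')' with empty tmp Python raises IndexError: such inputs are excluded by Pre_.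
def pvBTIstep (st : List Int × List Int) (ic : Int × Char) : List Int × List Int :=
  if ic.2 = '(' then (st.1, ic.1 :: st.2)
  else if ic.2 = ')' then
    match st.2 with
    | [] => st
    | j :: t => ((st.1.set ic.1.toNat j).set j.toNat ic.1, t)   -- res[i], res[j] = j, i
  else st

def bracketToIndex (inst : String) : List Int :=
  (List.foldl pvBTIstep (List.replicate (inst.toList.length + 2) (-1), [])
    (PySem.List.enumerate (pvPadded inst) 0)).1

-- aux's while-loop (pvGo, accumulators tmp/res).  The loop and the recursion only ever
-- move the scan position k to the right, so a fuel of len+4 steps is enough on every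
-- input the claim covers; `res += aux(k)` is transliterated inline in the child branch
-- (aux's head pair (k, index[k]) uses the already-matched index[k]).  An out-of-range
-- read of index is an IndexError in Python — those inputs are excluded by Pre_; the
-- port returns the accumulators there.
def pvGo : Nat → List Int → Nat → List (Int × Int) → List (List (Int × Int)) →
    List (Int × Int) × List (List (Int × Int))
  | 0, _, _, tmp, res => (tmp, res)
  | fuel + 1, index, k, tmp, res =>
    match PySem.List.pyGet? index (k : Int) with
    | none => (tmp, res)
    | some v =>
      if v = -1 then pvGo fuel index (k + 1) tmp res
      else if (k : Int) < v then
        pvGo fuel index (v.toNat + 1) (tmp ++ [((k : Int), v)])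
          (res ++ ((((k : Int), v) :: (pvGo fuel index (k + 1) [] []).1) ::
            (pvGo fuel index (k + 1) [] []).2))
      else (tmp, res)

-- aux(ind) = [[(ind, index[ind])] + tmp] + res with (tmp, res) from the loop
def pvAux (fuel : Nat) (index : List Int) (ind : Nat) : List (List (Int × Int)) :=
  let t := pvGo fuel index (ind + 1) [] []
  match PySem.List.pyGet? index (ind : Int) with
  | none => []
  | some v => (((ind : Int), v) :: t.1) :: t.2

def decomposition (inst : String) : List (List (Int × Int)) :=
  pvAux (inst.toList.length + 4) (bracketToIndex inst) 0

-- ===== PORT B =====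

-- one step of B's scan; state = (stack of frames (open, kids, sub), out), stack top =
-- list head.  On ')' with an empty stack Python raises IndexError: excluded by Pre_.
def pvBstep
    (st : List (Int × List (Int × Int) × List (List (Int × Int))) × Option (List (List (Int × Int))))
    (ic : Int × Char) :
    List (Int × List (Int × Int) × List (List (Int × Int))) × Option (List (List (Int × Int))) :=
  if ic.2 = '(' then ((ic.1, [], []) :: st.1, st.2)
  else if ic.2 = ')' then
    match st.1 with
    | [] => st
    | (o, kids, sub) :: rest =>
      let out := ([(o, ic.1)] ++ kids) :: sub
      match rest with
      | [] => ([], some out)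
      | (po, pkids, psub) :: rest2 => ((po, pkids ++ [(o, ic.1)], psub ++ out) :: rest2, some out)
  else st

-- Python's `return out` returns None only on inputs excluded by Pre_; the port returns [].
def decomposition_alt (inst : String) : List (List (Int × Int)) :=
  ((List.foldl pvBstep ([], none) (PySem.List.enumerate (pvPadded inst) 0)).2.getD [])

-- ===== PRECONDITION & SPEC =====
-- Pre_ admits exactly the balanced-bracket strings (the well-formed secondary
-- structures, the function's purpose).  It excludes the bracket-unbalanced strings: on
-- most of them A raises IndexError, and on the rest (a ')' that closes the virtual outer
-- pair) A's early loop break returns only the truncated first component while B returns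
-- the last one — accidental values on malformed input.
def Pre_decomposition (inst : String) : Prop :=
  (∀ i < inst.toList.length,
    (inst.toList.take i).count ')' ≤ (inst.toList.take i).count '(') ∧
  inst.toList.count '(' = inst.toList.count ')'
instance (inst : String) : Decidable (Pre_decomposition inst) := by
  unfold Pre_decomposition; infer_instance

def pvWitness_decomposition : String := "((.))"

def Spec_decomposition (inst : String) (out : List (List (Int × Int))) : Prop :=
  out = decomposition_alt inst
instance (inst : String) (out : List (List (Int × Int))) : Decidable (Spec_decomposition inst out) := by
  unfold Spec_decomposition; infer_instance

-- ===== CLAIM (what is proved, stated in full; the proofs are below) =====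
def Claim_equal_decomposition : Prop :=
  ∀ (inst : String), Dom_decomposition inst → Pre_decomposition inst →
    Spec_decomposition inst (decomposition inst)

-- ===== LEMMAS AND PROOFS =====

-- balanced bracket lists, by the grammar  S -> eps | c S (c not a bracket) | ( S ) S
inductive PvBal : List Char → Prop
| nil : PvBal []
| other {c : Char} {s : List Char} : c ≠ '(' → c ≠ ')' → PvBal s → PvBal (c :: s)
| pair {s t : List Char} : PvBal s → PvBal t → PvBal ('(' :: s ++ ')' :: t)

-- "index describes s's bracket matching on the segment starting at position i"
inductive PvSeg (index : List Int) : Nat → List Char → Prop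
| nil (i : Nat) : PvSeg index i []
| other {c : Char} {s : List Char} {i : Nat} : c ≠ '(' → c ≠ ')' →
    index[i]? = some (-1) → PvSeg index (i + 1) s → PvSeg index i (c :: s)
| pair {s t : List Char} {i : Nat} :
    index[i]? = some ((i : Int) + 1 + s.length) →
    index[i + 1 + s.length]? = some (i : Int) →
    PvSeg index (i + 1) s → PvSeg index (i + s.length + 2) t →
    PvSeg index i ('(' :: s ++ ')' :: t)

-- unfolding equation of pvAux and branch lemmas for pvGo

theorem pvGo_none {index : List Int} {k : Nat} (h : index[k]? = none)
    (fuel : Nat) (tmp : List (Int × Int)) (res : List (List (Int × Int))) :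
    pvGo fuel index k tmp res = (tmp, res) := by
  cases fuel with
  | zero => rfl
  | succ f => simp [pvGo, PySem.List.pyGet?_natCast, h]

theorem pvGo_skip {index : List Int} {k : Nat} (h : index[k]? = some (-1))
    (fuel : Nat) (tmp : List (Int × Int)) (res : List (List (Int × Int))) :
    pvGo (fuel + 1) index k tmp res = pvGo fuel index (k + 1) tmp res := by
  simp [pvGo, PySem.List.pyGet?_natCast, h]

theorem pvGo_child {index : List Int} {k : Nat} {v : Int} (h : index[k]? = some v)
    (hlt : (k : Int) < v) (fuel : Nat) (tmp : List (Int × Int))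
    (res : List (List (Int × Int))) :
    pvGo (fuel + 1) index k tmp res =
      pvGo fuel index (v.toNat + 1) (tmp ++ [((k : Int), v)])
        (res ++ ((((k : Int), v) :: (pvGo fuel index (k + 1) [] []).1) ::
          (pvGo fuel index (k + 1) [] []).2)) := by
  have hne : v ≠ -1 := by
    have := Int.natCast_nonneg k
    omega
  simp [pvGo, PySem.List.pyGet?_natCast, h, hne, hlt]

theorem pvGo_stop {index : List Int} {k : Nat} {v : Int} (h : index[k]? = some v)
    (h1 : v ≠ -1) (h2 : ¬ (k : Int) < v) (fuel : Nat) (tmp : List (Int × Int))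
    (res : List (List (Int × Int))) :
    pvGo fuel index k tmp res = (tmp, res) := by
  cases fuel with
  | zero => rfl
  | succ f => simp [pvGo, PySem.List.pyGet?_natCast, h, h1, h2]

-- any fuel of at least index.length + 2 - k computes the loop's stable value
theorem pvGo_adeq {index : List Int} :
    ∀ (f1 f2 k : Nat), index.length + 2 - k ≤ f1 → index.length + 2 - k ≤ f2 →
      ∀ tmp res, pvGo f1 index k tmp res = pvGo f2 index k tmp res := by
  intro f1
  induction f1 with
  | zero =>
    intro f2 k h1 h2 tmp res
    have hn : index[k]? = none := List.getElem?_eq_none (by omega)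
    rw [pvGo_none hn, pvGo_none hn]
  | succ f IH =>
    intro f2 k h1 h2 tmp res
    cases f2 with
    | zero =>
      have hn : index[k]? = none := List.getElem?_eq_none (by omega)
      rw [pvGo_none hn, pvGo_none hn]
    | succ g =>
      rcases hE : index[k]? with _ | v
      · rw [pvGo_none hE, pvGo_none hE]
      · have hk : k < index.length := by
          by_contra hge
          rw [List.getElem?_eq_none (by omega)] at hE
          cases hE
        by_cases hv1 : v = -1
        · subst hv1
          rw [pvGo_skip hE, pvGo_skip hE]
          exact IH g (k + 1) (by omega) (by omega) tmp res
        · by_cases hv2 : (k : Int) < v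
          · have hkv : k < v.toNat := by omega
            rw [pvGo_child hE hv2, pvGo_child hE hv2,
              IH g (k + 1) (by omega) (by omega) [] []]
            exact IH g (v.toNat + 1) (by omega) (by omega) _ _
          · rw [pvGo_stop hE hv1 hv2, pvGo_stop hE hv1 hv2]

theorem pvBTIstep_open (st : List Int × List Int) (p : Int) :
    pvBTIstep st (p, '(') = (st.1, p :: st.2) := by
  simp [pvBTIstep]

theorem pvBTIstep_close (res : List Int) (j : Int) (tmp : List Int) (p : Int) :
    pvBTIstep (res, j :: tmp) (p, ')') = ((res.set p.toNat j).set j.toNat p, tmp) := by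
  simp [pvBTIstep]

theorem pvBTIstep_other (st : List Int × List Int) (p : Int) (c : Char)
    (h1 : c ≠ '(') (h2 : c ≠ ')') : pvBTIstep st (p, c) = st := by
  simp [pvBTIstep, h1, h2]

theorem pvBstep_open
    (st : List (Int × List (Int × Int) × List (List (Int × Int))) × Option (List (List (Int × Int))))
    (p : Int) : pvBstep st (p, '(') = ((p, [], []) :: st.1, st.2) := by
  simp [pvBstep]

theorem pvBstep_other
    (st : List (Int × List (Int × Int) × List (List (Int × Int))) × Option (List (List (Int × Int))))
    (p : Int) (c : Char) (h1 : c ≠ '(') (h2 : c ≠ ')') : pvBstep st (p, c) = st := by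
  simp [pvBstep, h1, h2]

theorem pvBstep_close_root (o : Int) (kids : List (Int × Int)) (sub : List (List (Int × Int)))
    (out : Option (List (List (Int × Int)))) (p : Int) :
    pvBstep ([(o, kids, sub)], out) (p, ')') = ([], some (([(o, p)] ++ kids) :: sub)) := by
  simp [pvBstep]

theorem pvBstep_close_cons (o : Int) (kids : List (Int × Int)) (sub : List (List (Int × Int)))
    (po : Int) (pkids : List (Int × Int)) (psub : List (List (Int × Int)))
    (rest2 : List (Int × List (Int × Int) × List (List (Int × Int))))
    (out : Option (List (List (Int × Int)))) (p : Int) :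
    pvBstep ((o, kids, sub) :: (po, pkids, psub) :: rest2, out) (p, ')') =
      ((po, pkids ++ [(o, p)], psub ++ (([(o, p)] ++ kids) :: sub)) :: rest2,
        some (([(o, p)] ++ kids) :: sub)) := by
  simp [pvBstep]

-- Pre_ implies the grammar PvBal

theorem pv_pre_to_bal_aux : ∀ (n : Nat) (l : List Char), l.length ≤ n →
    (∀ i < l.length, (l.take i).count ')' ≤ (l.take i).count '(') →
    l.count '(' = l.count ')' → PvBal l := by
  intro n
  induction n with
  | zero =>
    intro l h _ _
    have : l = [] := List.eq_nil_of_length_eq_zero (by omega)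
    subst this
    exact PvBal.nil
  | succ n IH =>
    intro l hlen hpre htot
    match l with
    | [] => exact PvBal.nil
    | c :: t =>
      by_cases hc1 : c = '('
      · subst hc1
        have htot' : t.count ')' = t.count '(' + 1 := by
          rw [List.count_cons, List.count_cons] at htot
          simp at htot
          omega
        have Hd : ∀ i ≤ t.length, (t.take i).count ')' ≤ (t.take i).count '(' + 1 := by
          intro i hi
          rcases Nat.lt_or_ge i t.length with h | h
          · have h2 := hpre (i + 1) (by simp only [List.length_cons]; omega)
            rw [List.take_succ_cons, List.count_cons, List.count_cons] at h2
            simp at h2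
            omega
          · rw [List.take_of_length_le (by omega)]
            omega
        have hex : ∃ m, m ≤ t.length ∧ (t.take m).count ')' = (t.take m).count '(' + 1 :=
          ⟨t.length, le_refl _, by rw [List.take_of_length_le (le_refl _)]; omega⟩
        obtain ⟨m, ⟨hmle, hmeq⟩, hmin⟩ :
            ∃ m, (m ≤ t.length ∧ (t.take m).count ')' = (t.take m).count '(' + 1) ∧
              ∀ j < m, ¬ (j ≤ t.length ∧ (t.take j).count ')' = (t.take j).count '(' + 1) :=
          ⟨Nat.find hex, Nat.find_spec hex, fun j hj => Nat.find_min hex hj⟩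
        have hm1 : 1 ≤ m := by
          by_contra hm0
          have hz : m = 0 := by omega
          rw [hz] at hmeq
          simp at hmeq
        have hmlt : m - 1 < t.length := by omega
        have htakem : t.take m = t.take (m - 1) ++ [t[m - 1]] := by
          conv_lhs => rw [show m = (m - 1) + 1 by omega]
          rw [List.take_succ]
          simp [List.getElem?_eq_getElem hmlt]
        have hmid : t[m - 1] = ')' := by
          by_contra hne
          by_cases hq : t[m - 1] = '('
          · have e1 : List.count ')' ['('] = 0 := by decide
            have e2 : List.count '(' ['('] = 1 := by decide
            rw [htakem, hq, List.count_append, List.count_append, e1, e2] at hmeq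
            have hd := Hd (m - 1) (by omega)
            omega
          · have e1 : List.count ')' [t[m - 1]] = 0 := by
              simp [List.count_singleton, hne]
            have e2 : List.count '(' [t[m - 1]] = 0 := by
              simp [List.count_singleton, hq]
            rw [htakem, List.count_append, List.count_append, e1, e2] at hmeq
            exact hmin (m - 1) (by omega) ⟨by omega, by omega⟩
        have hsplit : t = t.take (m - 1) ++ ')' :: t.drop m := by
          conv_lhs => rw [← List.take_append_drop (m - 1) t]
          rw [List.drop_eq_getElem_cons hmlt, hmid, show m - 1 + 1 = m by omega]
        have e1 : List.count ')' [')'] = 1 := by decide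
        have e2 : List.count '(' [')'] = 0 := by decide
        have hbal1 : (t.take (m - 1)).count '(' = (t.take (m - 1)).count ')' := by
          rw [htakem, hmid, List.count_append, List.count_append, e1, e2] at hmeq
          omega
        have hpre1 : ∀ i < (t.take (m - 1)).length,
            ((t.take (m - 1)).take i).count ')' ≤ ((t.take (m - 1)).take i).count '(' := by
          intro i hi
          have hil : i < m - 1 := by
            rw [List.length_take] at hi
            omega
          have heq : (t.take (m - 1)).take i = t.take i := by
            rw [List.take_take]
            congr 1
            omega
          rw [heq]
          have hd := Hd i (by omega)
          by_contra hlt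
          exact hmin i (by omega) ⟨by omega, by omega⟩
        have hbal2 : (t.drop m).count '(' = (t.drop m).count ')' := by
          have hts : t.count '(' = (t.take m).count '(' + (t.drop m).count '(' := by
            conv_lhs => rw [← List.take_append_drop m t]
            rw [List.count_append]
          have hts2 : t.count ')' = (t.take m).count ')' + (t.drop m).count ')' := by
            conv_lhs => rw [← List.take_append_drop m t]
            rw [List.count_append]
          omega
        have hpre2 : ∀ i < (t.drop m).length,
            ((t.drop m).take i).count ')' ≤ ((t.drop m).take i).count '(' := by
          intro i hi
          rw [List.length_drop] at hi
          have hd := Hd (m + i) (by omega)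
          rw [List.take_add, List.count_append, List.count_append] at hd
          omega
        have hb1 : PvBal (t.take (m - 1)) := by
          apply IH _ _ hpre1 hbal1
          rw [List.length_take]
          simp only [List.length_cons] at hlen
          omega
        have hb2 : PvBal (t.drop m) := by
          apply IH _ _ hpre2 hbal2
          rw [List.length_drop]
          simp only [List.length_cons] at hlen
          omega
        rw [hsplit]
        exact PvBal.pair hb1 hb2
      · by_cases hc2 : c = ')'
        · exfalso
          subst hc2
          match t with
          | [] => exact absurd htot (by decide)
          | d :: t' =>
            have h1 := hpre 1 (by simp only [List.length_cons]; omega)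
            have e : ((')' : Char) :: d :: t').take 1 = [')'] := rfl
            rw [e] at h1
            have e1 : List.count ')' [')'] = 1 := by decide
            have e2 : List.count '(' [')'] = 0 := by decide
            rw [e1, e2] at h1
            omega
        · apply PvBal.other hc1 hc2
          apply IH t (by simp only [List.length_cons] at hlen; omega)
          · intro i hi
            have h2 := hpre (i + 1) (by simp only [List.length_cons]; omega)
            rw [List.take_succ_cons, List.count_cons, List.count_cons] at h2
            simp [hc1, hc2] at h2
            exact h2
          · rw [List.count_cons, List.count_cons] at htot
            simp [hc1, hc2] at htot
            exact htot

theorem pv_pre_to_bal (l : List Char)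
    (hpre : ∀ i < l.length, (l.take i).count ')' ≤ (l.take i).count '(')
    (htot : l.count '(' = l.count ')') : PvBal l :=
  pv_pre_to_bal_aux l.length l (le_refl _) hpre htot

-- bracket_to_index's fold over a balanced segment fills exactly that segment's matching

theorem pv_bti_seg {s : List Char} (hb : PvBal s) :
    ∀ (i : Nat) (tmp : List Int) (res₀ : List Int),
      (∀ j : Nat, i ≤ j → j < i + s.length → res₀[j]? = some (-1)) →
      i + s.length ≤ res₀.length →
      ∃ res' : List Int,
        List.foldl pvBTIstep (res₀, tmp) (PySem.List.enumerate s (i : Int)) = (res', tmp) ∧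
        res'.length = res₀.length ∧
        (∀ j : Nat, (j < i ∨ i + s.length ≤ j) → res'[j]? = res₀[j]?) ∧
        (∀ index : List Int,
          (∀ j : Nat, i ≤ j → j < i + s.length → index[j]? = res'[j]?) → PvSeg index i s) := by
  induction hb with
  | nil =>
    intro i tmp res₀ hreg hlen
    exact ⟨res₀, by simp [PySem.List.enumerate_nil], rfl, fun j _ => rfl,
      fun index _ => PvSeg.nil i⟩
  | @other c s hc1 hc2 hb IH =>
    intro i tmp res₀ hreg hlen
    obtain ⟨res', hfold, hl, hout, hseg⟩ := IH (i + 1) tmp res₀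
      (fun j h1 h2 => hreg j (by omega) (by simp only [List.length_cons]; omega))
      (by simp only [List.length_cons] at hlen; omega)
    refine ⟨res', ?_, hl, ?_, ?_⟩
    · rw [PySem.List.enumerate_cons, List.foldl_cons, pvBTIstep_other _ _ _ hc1 hc2,
        show ((i : Int) + 1) = ((i + 1 : Nat) : Int) from by omega]
      exact hfold
    · intro j hj
      apply hout j
      simp only [List.length_cons] at hj
      omega
    · intro index hag
      have hidx : index[i]? = some (-1) := by
        rw [hag i (le_refl i) (by simp only [List.length_cons]; omega), hout i (by omega),
          hreg i (le_refl i) (by simp only [List.length_cons]; omega)]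
      exact PvSeg.other hc1 hc2 hidx
        (hseg index (fun j h1 h2 => hag j (by omega) (by simp only [List.length_cons]; omega)))
  | @pair s t hbs hbt IH1 IH2 =>
    intro i tmp res₀ hreg hlen
    have hlentot : ('(' :: s ++ ')' :: t).length = s.length + t.length + 2 := by
      simp only [List.length_append, List.length_cons]
      omega
    obtain ⟨res1, hf1, hl1, ho1, hsg1⟩ := IH1 (i + 1) ((i : Int) :: tmp) res₀
      (fun j h1 h2 => hreg j (by omega) (by rw [hlentot]; omega))
      (by rw [hlentot] at hlen; omega)
    set res2 : List Int :=
      (res1.set (i + 1 + s.length) ((i : Nat) : Int)).set i ((i : Int) + 1 + (s.length : Int))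
      with hres2
    have hl2' : res2.length = res₀.length := by simp [hres2, hl1]
    have hr2reg : ∀ j : Nat, i + s.length + 2 ≤ j → j < (i + s.length + 2) + t.length →
        res2[j]? = some (-1) := by
      intro j h1 h2
      rw [hres2, List.getElem?_set_ne (by omega), List.getElem?_set_ne (by omega),
        ho1 j (by omega), hreg j (by omega) (by rw [hlentot]; omega)]
    obtain ⟨res3, hf2, hl2, ho2, hsg2⟩ := IH2 (i + s.length + 2) tmp res2 hr2reg
      (by rw [hl2']; rw [hlentot] at hlen; omega)
    refine ⟨res3, ?_, by rw [hl2, hl2'], ?_, ?_⟩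
    · push_cast at hf1 hf2
      simp only [List.cons_append, PySem.List.enumerate_cons, PySem.List.enumerate_append,
        List.foldl_cons, List.foldl_append, List.length_cons, Nat.cast_add, Nat.cast_one]
      rw [pvBTIstep_open, hf1, pvBTIstep_close,
        show (((i : Int) + 1 + (s.length : Int))).toNat = i + 1 + s.length from by omega,
        Int.toNat_natCast,
        show ((i : Int) + 1 + (s.length : Int) + 1) = (i : Int) + (s.length : Int) + 2 from by
          ring]
      exact hf2
    · intro j hj
      rw [hlentot] at hj
      rw [ho2 j (by omega), hres2, List.getElem?_set_ne (by omega),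
        List.getElem?_set_ne (by omega)]
      exact ho1 j (by omega)
    · intro index hag
      have hg1 : index[i]? = some ((i : Int) + 1 + (s.length : Int)) := by
        rw [hag i (le_refl i) (by rw [hlentot]; omega), ho2 i (by omega), hres2,
          List.getElem?_set_self (by simp only [List.length_set, hl1]; omega)]
      have hg2 : index[i + 1 + s.length]? = some (i : Int) := by
        rw [hag (i + 1 + s.length) (by omega) (by rw [hlentot]; omega),
          ho2 (i + 1 + s.length) (by omega), hres2, List.getElem?_set_ne (by omega),
          List.getElem?_set_self (by rw [hl1]; omega)]
      refine PvSeg.pair hg1 hg2 ?_ ?_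
      · apply hsg1 index
        intro j h1 h2
        rw [hag j (by omega) (by rw [hlentot]; omega), ho2 j (by omega), hres2,
          List.getElem?_set_ne (by omega), List.getElem?_set_ne (by omega)]
      · apply hsg2 index
        intro j h1 h2
        rw [hag j (by omega) (by rw [hlentot]; omega)]

-- the heart: over a described segment, A's loop and B's scan accumulate the same
-- component pairs K and the same emitted component list C

theorem pv_main {index : List Int} {i : Nat} {s : List Char} (hseg : PvSeg index i s) :
    ∃ (K : List (Int × Int)) (C : List (List (Int × Int))),
      (∀ fuel, index.length + 2 ≤ fuel → ∀ tmp res,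
        pvGo fuel index i tmp res = pvGo fuel index (i + s.length) (tmp ++ K) (res ++ C)) ∧
      (∀ stk o kids sub out, ∃ out',
        List.foldl pvBstep ((o, kids, sub) :: stk, out) (PySem.List.enumerate s (i : Int)) =
          ((o, kids ++ K, sub ++ C) :: stk, out')) := by
  induction hseg with
  | nil i =>
    exact ⟨[], [], fun fuel hf tmp res => by simp,
      fun stk o kids sub out => ⟨out, by simp [PySem.List.enumerate_nil]⟩⟩
  | @other c s i hc1 hc2 hidx hs IH =>
    obtain ⟨K, C, hA, hB⟩ := IH
    refine ⟨K, C, fun fuel hf tmp res => ?_, fun stk o kids sub out => ?_⟩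
    · obtain ⟨f, rfl⟩ : ∃ f, fuel = f + 1 := ⟨fuel - 1, by omega⟩
      rw [show i + (c :: s).length = i + 1 + s.length from by
        simp only [List.length_cons]; omega, pvGo_skip hidx,
        pvGo_adeq f (f + 1) (i + 1) (by omega) (by omega) tmp res]
      exact hA (f + 1) hf tmp res
    · obtain ⟨out', h⟩ := hB stk o kids sub out
      refine ⟨out', ?_⟩
      rw [PySem.List.enumerate_cons, List.foldl_cons, pvBstep_other _ _ _ hc1 hc2,
        show ((i : Int) + 1) = ((i + 1 : Nat) : Int) from by omega]
      exact h
  | @pair s t i hidx1 hidx2 hs ht IH1 IH2 =>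
    obtain ⟨K1, C1, hA1, hB1⟩ := IH1
    obtain ⟨K2, C2, hA2, hB2⟩ := IH2
    have hvlt : (i : Int) < (i : Int) + 1 + (s.length : Int) := by omega
    have hlen : i < index.length := by
      by_contra hge
      rw [List.getElem?_eq_none (by omega)] at hidx1
      cases hidx1
    refine ⟨((i : Int), (i : Int) + 1 + (s.length : Int)) :: K2,
      ((((i : Int), (i : Int) + 1 + (s.length : Int)) :: K1) :: C1) ++ C2,
      fun fuel hf tmp res => ?_, fun stk o kids sub out => ?_⟩
    · obtain ⟨f, rfl⟩ : ∃ f, fuel = f + 1 := ⟨fuel - 1, by omega⟩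
      have ht1 : pvGo f index (i + 1) [] [] = (K1, C1) := by
        rw [pvGo_adeq f (f + 1) (i + 1) (by omega) (by omega) [] []]
        have h1 := hA1 (f + 1) hf [] []
        simp only [List.nil_append] at h1
        rw [h1]
        exact pvGo_stop hidx2 (by omega) (by omega) (f + 1) K1 C1
      rw [show i + ('(' :: s ++ ')' :: t).length = (i + s.length + 2) + t.length from by
        simp only [List.length_append, List.length_cons]; omega,
        pvGo_child hidx1 hvlt, ht1,
        show ((i : Int) + 1 + (s.length : Int)).toNat + 1 = i + s.length + 2 from by omega,
        pvGo_adeq f (f + 1) (i + s.length + 2) (by omega) (by omega) _ _]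
      rw [hA2 (f + 1) hf _ _]
      simp [List.append_assoc]
    · obtain ⟨out1, h1⟩ := hB1 ((o, kids, sub) :: stk) (i : Int) [] [] out
      simp only [List.nil_append] at h1
      push_cast at h1
      obtain ⟨out2, h2⟩ := hB2 stk o (kids ++ [((i : Int), (i : Int) + 1 + (s.length : Int))])
        (sub ++ ((((i : Int), (i : Int) + 1 + (s.length : Int)) :: K1) :: C1))
        (some ((((i : Int), (i : Int) + 1 + (s.length : Int)) :: K1) :: C1))
      push_cast at h2
      refine ⟨out2, ?_⟩
      simp only [List.cons_append, PySem.List.enumerate_cons, PySem.List.enumerate_append,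
        List.foldl_cons, List.foldl_append]
      rw [pvBstep_open, h1, pvBstep_close_cons, List.singleton_append,
        show ((i : Int) + 1 + (s.length : Int) + 1) = (i : Int) + (s.length : Int) + 2 from by
          ring]
      rw [h2]
      simp [List.append_assoc]

-- ===== VERDICT (by name: the statement is the Claim_ definition above) =====
theorem decomposition_spec : Claim_equal_decomposition := by
  unfold Claim_equal_decomposition
  intro inst _hdom hpre
  unfold Spec_decomposition
  obtain ⟨hp, ht⟩ := hpre
  have hbal : PvBal inst.toList := pv_pre_to_bal _ hp ht
  set l := inst.toList with hl
  obtain ⟨res1, hf1, hl1, ho1, hsg1⟩ := pv_bti_seg hbal 1 [(0 : Int)]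
    (List.replicate (l.length + 2) (-1))
    (fun j h1 h2 => by rw [List.getElem?_replicate, if_pos (by omega)])
    (by rw [List.length_replicate]; omega)
  have hidx : bracketToIndex inst =
      (res1.set (l.length + 1) 0).set 0 ((l.length : Int) + 1) := by
    unfold bracketToIndex pvPadded
    rw [← hl]
    push_cast at hf1
    simp only [PySem.List.enumerate_cons, PySem.List.enumerate_append,
      PySem.List.enumerate_nil, List.foldl_cons, List.foldl_append, List.foldl_nil, zero_add,
      List.length_cons, Nat.cast_add, Nat.cast_one]
    rw [pvBTIstep_open, hf1, pvBTIstep_close,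
      show (((l.length : Int) + 1)).toNat = l.length + 1 from by omega,
      show ((0 : Int)).toNat = 0 from rfl]
  set index : List Int := (res1.set (l.length + 1) 0).set 0 ((l.length : Int) + 1) with hidef
  have hlenres : res1.length = l.length + 2 := by rw [hl1, List.length_replicate]
  have hlenidx : index.length = l.length + 2 := by
    rw [hidef]
    simp only [List.length_set]
    exact hlenres
  have hI0 : index[(0 : Nat)]? = some ((l.length : Int) + 1) := by
    rw [hidef]
    exact List.getElem?_set_self (by simp only [List.length_set, hlenres]; omega)
  have hIend : index[l.length + 1]? = some (0 : Int) := by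
    rw [hidef, List.getElem?_set_ne (by omega)]
    exact List.getElem?_set_self (by rw [hlenres]; omega)
  have hseg : PvSeg index 1 l := by
    apply hsg1 index
    intro j h1 h2
    rw [hidef, List.getElem?_set_ne (by omega), List.getElem?_set_ne (by omega)]
  obtain ⟨K, C, hA, hB⟩ := pv_main hseg
  have hAval : decomposition inst = (((0 : Int), (l.length : Int) + 1) :: K) :: C := by
    unfold decomposition pvAux
    rw [← hl, hidx]
    simp only [Nat.cast_zero, Nat.zero_add, PySem.List.pyGet?_zero]
    rw [hI0]
    have h1 := hA (l.length + 4) (by omega) [] []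
    simp only [List.nil_append] at h1
    have h2 : pvGo (l.length + 4) index (1 + l.length) K C = (K, C) := by
      rw [Nat.add_comm 1 l.length]
      exact pvGo_stop hIend (by decide) (by omega) (l.length + 4) K C
    rw [h1, h2]
  have hBval : decomposition_alt inst = (((0 : Int), (l.length : Int) + 1) :: K) :: C := by
    unfold decomposition_alt pvPadded
    rw [← hl]
    obtain ⟨out1, h1⟩ := hB [] (0 : Int) [] [] none
    simp only [List.nil_append] at h1
    push_cast at h1
    simp only [PySem.List.enumerate_cons, PySem.List.enumerate_append,
      PySem.List.enumerate_nil, List.foldl_cons, List.foldl_append, List.foldl_nil, zero_add]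
    rw [pvBstep_open, h1, pvBstep_close_root]
    simp
  rw [hAval, hBval]
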